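-- pv_equiv track=rewrite | github.com/kenbockler/Andmeteaduse_masin-ppe_projekt | PROJEKT/K10/S243/2021-11-03-22-25-04/kodu1.py | grupeeri
-- ===== SOURCE A (Python) =====
-- def grupeeri(lause):
--     täis={}
--     kaas={}
--     muud={}
--     täishäälikud=("a", "e", "i", "o", "u", "õ", "ä", "ö", "ü")
--     kaashäälikud=("B","C", "D", "F", "G", "J", "K", "L", "M", "N", "P", "Q", "S", "T", "V", "X", "Z", "H", "R", "W", "Y")
--     for täht in lause:
--         if täht.lower() in täishäälikud:
--             if täht in täis:
--                 täis[täht]+=1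
--             else:
--                 täis[täht]=1
--         elif täht.upper() in kaashäälikud:
--             if täht in kaas:
--                 kaas[täht]+=1
--             else:
--                 kaas[täht]=1
--         elif täht not in täishäälikud and täht not in kaashäälikud:
--             if täht in muud:
--                 muud[täht]+=1
--             else:
--                 muud[täht]=1
--     hulk={}
--     sõnastik={"Täishäälikud": set(täis.items()), "Kaashäälikud": set(kaas.items()), "Muud": set(muud.items())}
--     return sõnastik
-- ===== SOURCE B (Python) =====
-- def grupeeri(lause):
--     täishäälikud = ("a", "e", "i", "o", "u", "õ", "ä", "ö", "ü")
--     kaashäälikud = ("B", "C", "D", "F", "G", "J", "K", "L", "M", "N", "P", "Q",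
--                     "S", "T", "V", "X", "Z", "H", "R", "W", "Y")
--
--     def on_täis(t):
--         return t.lower() in täishäälikud
--
--     def tabel(g):
--         # frequency table of one group, returned as a set of (char, count) pairs
--         d = {}
--         for t in g:
--             d[t] = d.get(t, 0) + 1
--         return set(d.items())
--
--     # partition the sentence into the three groups first, then count each group
--     v = [t for t in lause if on_täis(t)]
--     k = [t for t in lause if not on_täis(t) and t.upper() in kaashäälikud]
--     m = [t for t in lause if not on_täis(t) and t.upper() not in kaashäälikud]
--     return {"Täishäälikud": tabel(v), "Kaashäälikud": tabel(k), "Muud": tabel(m)}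
-- ===== Notes on version B (the rewrite author's own statement) =====
-- stated objective: alternative
-- what changed: A classifies every character inside one combined loop that keeps three frequency dicts and increments one of them per occurrence; B instead partitions the sentence into three filtered character lists first (vowels / consonants / others, with A's exact case-sensitive tests) and then builds each group's frequency table independently with one generic counting helper.
import Mathlib
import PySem

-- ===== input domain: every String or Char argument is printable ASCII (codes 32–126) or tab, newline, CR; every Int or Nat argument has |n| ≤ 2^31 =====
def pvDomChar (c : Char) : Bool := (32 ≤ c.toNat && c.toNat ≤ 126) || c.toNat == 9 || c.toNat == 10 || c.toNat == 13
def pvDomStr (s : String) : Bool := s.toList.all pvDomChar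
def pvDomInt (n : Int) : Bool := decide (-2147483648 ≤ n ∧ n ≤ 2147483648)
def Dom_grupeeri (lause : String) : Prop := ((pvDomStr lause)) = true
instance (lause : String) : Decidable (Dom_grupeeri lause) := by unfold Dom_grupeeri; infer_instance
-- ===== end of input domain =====

-- B replaces A's single classify-and-increment loop over three dicts by partitioning the
-- string into the three groups first and counting each group with one generic helper
-- (a different decomposition of the same task; no speed claim).

-- ===== PORT A =====
def pvVow : List String := ["a", "e", "i", "o", "u", "õ", "ä", "ö", "ü"]
def pvCons : List String := ["B", "C", "D", "F", "G", "J", "K", "L", "M", "N", "P", "Q",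
                             "S", "T", "V", "X", "Z", "H", "R", "W", "Y"]

-- 'if täht in d: d[täht]+=1 else: d[täht]=1'
def pvBump (d : PySem.Dict String Int) (t : String) : PySem.Dict String Int :=
  match d.get? t with
  | some v => d.insert t (v + 1)
  | none   => d.insert t 1

def grupeeri (lause : String) : List (String × List (String × Int)) :=
  let chars := lause.toList.map (fun c => String.ofList [c])   -- 'for täht in lause'
  let st := chars.foldl
    (fun (st : PySem.Dict String Int × PySem.Dict String Int × PySem.Dict String Int) t =>
      if pvVow.contains (PySem.Str.lower t) then (pvBump st.1 t, st.2.1, st.2.2)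
      else if pvCons.contains (PySem.Str.upper t) then (st.1, pvBump st.2.1 t, st.2.2)
      else if !pvVow.contains t && !pvCons.contains t then (st.1, st.2.1, pvBump st.2.2 t)
      else st)
    (PySem.Dict.empty, PySem.Dict.empty, PySem.Dict.empty)
  [("Täishäälikud", PySem.Set.ofList st.1.items),
   ("Kaashäälikud", PySem.Set.ofList st.2.1.items),
   ("Muud", PySem.Set.ofList st.2.2.items)]

-- ===== PORT B =====
-- 'def on_täis(t): return t.lower() in täishäälikud'
def pvOnTais (t : String) : Bool := pvVow.contains (PySem.Str.lower t)

-- 'def tabel(g): d = {}; for t in g: d[t] = d.get(t, 0) + 1; return set(d.items())'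
def pvTabel (g : List String) : List (String × Int) :=
  PySem.Set.ofList
    ((g.foldl (fun d t => d.insert t (d.getD t 0 + 1)) PySem.Dict.empty).items)

def grupeeri_alt (lause : String) : List (String × List (String × Int)) :=
  let chars := lause.toList.map (fun c => String.ofList [c])
  let v := chars.filter (fun t => pvOnTais t)
  let k := chars.filter (fun t => !pvOnTais t && pvCons.contains (PySem.Str.upper t))
  let m := chars.filter (fun t => !pvOnTais t && !pvCons.contains (PySem.Str.upper t))
  [("Täishäälikud", pvTabel v), ("Kaashäälikud", pvTabel k), ("Muud", pvTabel m)]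

-- ===== PRECONDITION & SPEC =====
def Spec_grupeeri (lause : String) (out : List (String × List (String × Int))) : Prop := out = grupeeri_alt lause
instance (lause : String) (out : List (String × List (String × Int))) : Decidable (Spec_grupeeri lause out) := by unfold Spec_grupeeri; infer_instance

-- ===== CLAIM (what is proved, stated in full; the proofs are below) =====
def Claim_equal_grupeeri : Prop := ∀ (lause : String), Dom_grupeeri lause → Spec_grupeeri lause (grupeeri lause)

-- ===== LEMMAS AND PROOFS =====

-- mutually exclusive forms of A's branch conditions
def pvIsV (t : String) : Bool := pvOnTais t
def pvIsK (t : String) : Bool := !pvOnTais t && pvCons.contains (PySem.Str.upper t)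
def pvIsM (t : String) : Bool := !pvOnTais t && !pvCons.contains (PySem.Str.upper t)

theorem pv_mem_vow_lower (t : String) (h : pvVow.contains t = true) :
    pvVow.contains (PySem.Str.lower t) = true := by
  simp only [pvVow, List.contains_eq_mem, List.mem_cons, decide_eq_true_eq] at h ⊢
  rcases h with h|h|h|h|h|h|h|h|h|h <;> first | (subst h; decide) | simp at h

theorem pv_mem_cons_upper (t : String) (h : pvCons.contains t = true) :
    pvCons.contains (PySem.Str.upper t) = true := by
  simp only [pvCons, List.contains_eq_mem, List.mem_cons, decide_eq_true_eq] at h ⊢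
  rcases h with h|h|h|h|h|h|h|h|h|h|h|h|h|h|h|h|h|h|h|h|h|h <;> first | (subst h; decide) | simp at h

theorem pvBump_eq (d : PySem.Dict String Int) (t : String) :
    pvBump d t = d.insert t (d.getD t 0 + 1) := by
  unfold pvBump PySem.Dict.getD
  cases d.get? t <;> rfl

abbrev pvD := PySem.Dict String Int

def fA1 (d : pvD) (t : String) : pvD := if pvIsV t then pvBump d t else d
def fA2 (d : pvD) (t : String) : pvD := if pvIsK t then pvBump d t else d
def fA3 (d : pvD) (t : String) : pvD := if pvIsM t then pvBump d t else d
def fA23 (pr : pvD × pvD) (t : String) : pvD × pvD := (fA2 pr.1 t, fA3 pr.2 t)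

-- A's step function, written componentwise (the third branch's guard is redundant)
theorem stepA_eq :
    (fun (st : pvD × pvD × pvD) (t : String) =>
      if pvVow.contains (PySem.Str.lower t) then (pvBump st.1 t, st.2.1, st.2.2)
      else if pvCons.contains (PySem.Str.upper t) then (st.1, pvBump st.2.1 t, st.2.2)
      else if !pvVow.contains t && !pvCons.contains t then (st.1, st.2.1, pvBump st.2.2 t)
      else st)
    = fun st t => (fA1 st.1 t, fA23 st.2 t) := by
  funext st t
  rcases st with ⟨d1, d2, d3⟩
  simp only [fA1, fA23, fA2, fA3, pvIsV, pvIsK, pvIsM, pvOnTais]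
  by_cases hv : pvVow.contains (PySem.Str.lower t) = true
  · simp_all
  · by_cases hk : pvCons.contains (PySem.Str.upper t) = true
    · simp_all
    · simp only [Bool.not_eq_true] at hv hk
      have h1 : pvVow.contains t = false := by
        cases h : pvVow.contains t
        · rfl
        · rw [pv_mem_vow_lower t h] at hv; exact absurd hv (by simp)
      have h2 : pvCons.contains t = false := by
        cases h : pvCons.contains t
        · rfl
        · rw [pv_mem_cons_upper t h] at hk; exact absurd hk (by simp)
      simp_all

theorem pvBump_funext : pvBump = fun (d : pvD) t => d.insert t (d.getD t 0 + 1) :=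
  funext fun d => funext fun t => pvBump_eq d t

-- each A-component is the counter of the correspondingly filtered character list
theorem foldA_comp (q : String → Bool) (chars : List String) :
    chars.foldl (fun d t => if q t then pvBump d t else d) PySem.Dict.empty
      = PySem.Dict.counter (chars.filter q) := by
  rw [PySem.List.foldl_if_eq_foldl_filter, pvBump_funext]
  exact PySem.Dict.foldl_insert_getD_add_one_eq_counter _

-- B's counting helper is the counter of its group
theorem pvTabel_eq (g : List String) :
    pvTabel g = PySem.Set.ofList (PySem.Dict.counter g).items := by
  unfold pvTabel
  rw [PySem.Dict.foldl_insert_getD_add_one_eq_counter]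

theorem grupeeri_eq (lause : String) : grupeeri lause = grupeeri_alt lause := by
  simp only [grupeeri, grupeeri_alt]
  rw [stepA_eq]
  rw [PySem.List.foldl_prod_mk (f := fA1) (g := fA23)]
  unfold fA23
  rw [PySem.List.foldl_prod_mk (f := fA2) (g := fA3)]
  unfold fA1 fA2 fA3
  rw [foldA_comp pvIsV, foldA_comp pvIsK, foldA_comp pvIsM,
      pvTabel_eq, pvTabel_eq, pvTabel_eq]
  unfold pvIsV pvIsK pvIsM
  rfl

-- ===== VERDICT (by name: the statement is the Claim_ definition above) =====
theorem grupeeri_spec : Claim_equal_grupeeri := by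
  intro lause _
  unfold Spec_grupeeri
  exact grupeeri_eq lause
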